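-- pv_equiv track=rewrite | github.com/vojtechmanda/minesweeper | minesweeper_s_AI_backtrackingem.py | analyze_revealed_cells
-- ===== SOURCE A (Python) =====
-- def analyze_revealed_cells(visible_board):
--   safe_cells = []
--   flagged_cells = []
--   for row in range(len(visible_board)):
--     for col in range(len(visible_board[0])):
--       if visible_board[row][col].isdigit():
--         num_mines = int(visible_board[row][col])
--         # Count revealed neighbors (excluding flags)
--         revealed_neighbors = 0
--         for i in range(row - 1, row + 2):
--           for j in range(col - 1, col + 2):
--             if 0 <= i < len(visible_board) and 0 <= j < len(visible_board[0]) and visible_board[i][j] != "-":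
--               revealed_neighbors += 1
--         # Check for guaranteed safe/mine neighbors based on revealed info
--         hidden_neighbors = num_mines - revealed_neighbors
--         if hidden_neighbors == 1:
--           for i in range(row - 1, row + 2):
--             for j in range(col - 1, col + 2):
--               if 0 <= i < len(visible_board) and 0 <= j < len(visible_board[0]) and visible_board[i][j] == "-":
--                 safe_cells.append((i, j))
--         elif hidden_neighbors == 0:
--           flagged_cells.append((row, col))
--   return safe_cells, flagged_cells
-- ===== SOURCE B (Python) =====
-- def analyze_revealed_cells(visible_board):
--     safe_cells = []
--     flagged_cells = []
--     n_rows = len(visible_board)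
--     n_cols = len(visible_board[0]) if visible_board else 0
--     # pass 1: one sweep of the board collecting all digit cells and all hidden cells
--     digit_cells = []
--     hidden_cells = []
--     for r in range(n_rows):
--         for c in range(n_cols):
--             cell = visible_board[r][c]
--             if cell.isdigit():
--                 digit_cells.append((r, c, int(cell)))
--             elif cell == "-":
--                 hidden_cells.append((r, c))
--     # pass 2: per digit cell, derive its hidden neighbours from the global hidden list
--     # and its in-bounds neighbour count from a closed-form formula (no 3x3 scans)
--     for (r, c, n) in digit_cells:
--         hid = [h for h in hidden_cells if abs(h[0] - r) <= 1 and abs(h[1] - c) <= 1]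
--         inb = (min(r + 1, n_rows - 1) - max(r - 1, 0) + 1) * (min(c + 1, n_cols - 1) - max(c - 1, 0) + 1)
--         need = n - (inb - len(hid))
--         if need == 1:
--             safe_cells += hid
--         elif need == 0:
--             flagged_cells.append((r, c))
--     return safe_cells, flagged_cells
-- ===== Notes on version B (the rewrite author's own statement) =====
-- stated objective: alternative
-- what changed: B has no 3x3 neighbourhood scans at all: one sweep collects the coordinates of every digit cell and every hidden ('-') cell, then each digit's hidden neighbours are obtained by filtering the global hidden-cell list by Chebyshev distance <= 1 and its revealed count is derived from a closed-form in-bounds-neighbour formula (min/max span product) instead of A's two counting/collecting 3x3 loops.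
import Mathlib
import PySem

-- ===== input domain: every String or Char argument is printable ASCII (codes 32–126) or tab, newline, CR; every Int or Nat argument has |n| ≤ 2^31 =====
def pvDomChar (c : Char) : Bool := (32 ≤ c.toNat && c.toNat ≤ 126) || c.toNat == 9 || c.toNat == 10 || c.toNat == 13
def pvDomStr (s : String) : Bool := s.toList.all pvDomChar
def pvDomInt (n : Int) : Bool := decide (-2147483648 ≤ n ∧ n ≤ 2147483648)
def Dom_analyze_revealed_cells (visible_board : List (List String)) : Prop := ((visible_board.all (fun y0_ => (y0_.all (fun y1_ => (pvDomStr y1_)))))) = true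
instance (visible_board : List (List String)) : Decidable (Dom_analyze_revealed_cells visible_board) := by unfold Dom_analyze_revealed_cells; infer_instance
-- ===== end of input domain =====

-- B has no 3x3 scans: one sweep collects digit and hidden cells, then each digit filters the global
-- hidden list by distance and counts in-bounds neighbours by a closed-form formula (objective: alternative).

-- shared indexing helper: visible_board[i][j] (total via defaults; only read in range on Pre_ inputs)
def pvCell (vb : List (List String)) (i j : Int) : String :=
  PySem.List.pyGetD (PySem.List.pyGetD vb i []) j ""

-- ===== PORT A =====
def analyze_revealed_cells (visible_board : List (List String)) : (List (Int × Int)) × (List (Int × Int)) :=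
  let nrows : Int := (visible_board.length : Int)
  let ncols : Int := ((PySem.List.pyGetD visible_board 0 []).length : Int)
  (PySem.List.pyRange 0 nrows 1).foldl (fun st row =>
    (PySem.List.pyRange 0 ncols 1).foldl (fun st col =>
      if PySem.Str.strIsdigit (pvCell visible_board row col) then
        let num_mines : Int := (PySem.Int.ofStr? (pvCell visible_board row col)).getD 0
        let revealed : Int := (PySem.List.pyRange (row - 1) (row + 2) 1).foldl (fun acc i =>
          (PySem.List.pyRange (col - 1) (col + 2) 1).foldl (fun acc j =>
            if 0 ≤ i ∧ i < nrows ∧ 0 ≤ j ∧ j < ncols ∧ pvCell visible_board i j ≠ "-" then acc + 1 else acc) acc) 0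
        let hidden_neighbors : Int := num_mines - revealed
        if hidden_neighbors = 1 then
          ((PySem.List.pyRange (row - 1) (row + 2) 1).foldl (fun sc i =>
            (PySem.List.pyRange (col - 1) (col + 2) 1).foldl (fun sc j =>
              if 0 ≤ i ∧ i < nrows ∧ 0 ≤ j ∧ j < ncols ∧ pvCell visible_board i j = "-" then sc ++ [(i, j)] else sc) sc) st.1, st.2)
        else if hidden_neighbors = 0 then (st.1, st.2 ++ [(row, col)])
        else st
      else st) st) ([], [])

-- ===== PORT B =====
def analyze_revealed_cells_alt (visible_board : List (List String)) : (List (Int × Int)) × (List (Int × Int)) :=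
  let n_rows : Int := (visible_board.length : Int)
  let n_cols : Int := match visible_board with | [] => 0 | r0 :: _ => (r0.length : Int)
  -- pass 1: one sweep collecting digit cells and hidden cells
  let pass1 : List (Int × Int × Int) × List (Int × Int) :=
    (PySem.List.pyRange 0 n_rows 1).foldl (fun st r =>
      (PySem.List.pyRange 0 n_cols 1).foldl (fun st c =>
        if PySem.Str.strIsdigit (pvCell visible_board r c) then
          (st.1 ++ [(r, c, (PySem.Int.ofStr? (pvCell visible_board r c)).getD 0)], st.2)
        else if pvCell visible_board r c = "-" then (st.1, st.2 ++ [(r, c)])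
        else st) st) ([], [])
  -- pass 2: per digit cell, filter the global hidden list; in-bounds neighbour count by closed form
  pass1.1.foldl (fun st t =>
    let hid := pass1.2.filter (fun h => decide (|h.1 - t.1| ≤ 1 ∧ |h.2 - t.2.1| ≤ 1))
    let inb : Int := (min (t.1 + 1) (n_rows - 1) - max (t.1 - 1) 0 + 1) * (min (t.2.1 + 1) (n_cols - 1) - max (t.2.1 - 1) 0 + 1)
    let need : Int := t.2.2 - (inb - (hid.length : Int))
    if need = 1 then (st.1 ++ hid, st.2)
    else if need = 0 then (st.1, st.2 ++ [(t.1, t.2.1)])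
    else st) ([], [])

-- ===== PRECONDITION & SPEC =====
-- Pre_ excludes exactly the ragged boards on which Python A raises IndexError (a row shorter than row 0).
def Pre_analyze_revealed_cells (visible_board : List (List String)) : Prop :=
  ∀ r ∈ visible_board, (visible_board.headD []).length ≤ r.length
instance (visible_board : List (List String)) : Decidable (Pre_analyze_revealed_cells visible_board) := by unfold Pre_analyze_revealed_cells; infer_instance
def pvWitness_analyze_revealed_cells : List (List String) := [["1", "-"], ["-", "-"]]
def Spec_analyze_revealed_cells (visible_board : List (List String)) (out : (List (Int × Int)) × (List (Int × Int))) : Prop := out = analyze_revealed_cells_alt visible_board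
instance (visible_board : List (List String)) (out : (List (Int × Int)) × (List (Int × Int))) : Decidable (Spec_analyze_revealed_cells visible_board out) := by unfold Spec_analyze_revealed_cells; infer_instance

-- ===== CLAIM (what is proved, stated in full; the proofs are below) =====
def Claim_equal_analyze_revealed_cells : Prop := ∀ (visible_board : List (List String)), Dom_analyze_revealed_cells visible_board → Pre_analyze_revealed_cells visible_board → Spec_analyze_revealed_cells visible_board (analyze_revealed_cells visible_board)

-- ===== LEMMAS AND PROOFS =====

theorem pvRange3 (a : Int) : PySem.List.pyRange (a - 1) (a + 2) 1 = [a - 1, a, a + 1] := by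
  rw [PySem.List.pyRange_one_cons (by omega)]
  have h1 : a - 1 + 1 = a := by omega
  rw [h1, PySem.List.pyRange_one_cons (by omega)]
  rw [PySem.List.pyRange_one_cons (by omega)]
  rw [show a + 1 + 1 = a + 2 by omega, PySem.List.pyRange_one_eq_nil (by omega)]

theorem pvFoldFlat {γ : Type} (g : γ → Int → Int → γ) (is js : List Int) (a : γ) :
    is.foldl (fun a i => js.foldl (fun a j => g a i j) a) a
      = (is.flatMap (fun i => js.map (fun j => (i, j)))).foldl (fun a p => g a p.1 p.2) a := by
  induction is generalizing a with
  | nil => rfl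
  | cons i is ih => simp [List.foldl_append, List.foldl_map, ih]

theorem pvFiltProd (p q : Int → Bool) (is js : List Int) :
    (is.flatMap (fun i => js.map (fun j => (i, j)))).filter (fun t => p t.1 && q t.2)
      = (is.filter p).flatMap (fun i => (js.filter q).map (fun j => (i, j))) := by
  induction is with
  | nil => rfl
  | cons i is ih =>
    by_cases hp : p i <;>
      simp [List.filter_append, List.filter_map, Function.comp_def, hp, ih]

theorem pvLenProd (is js : List Int) :
    (is.flatMap (fun i => js.map (fun j => (i, j)))).length = is.length * js.length := by
  induction is with
  | nil => simp
  | cons i is ih => simp [ih, Nat.succ_mul, Nat.add_comm]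

theorem pvMemGrid (nr nc : Int) (t : Int × Int) :
    t ∈ (PySem.List.pyRange 0 nr 1).flatMap (fun i => (PySem.List.pyRange 0 nc 1).map (fun j => (i, j)))
      ↔ 0 ≤ t.1 ∧ t.1 < nr ∧ 0 ≤ t.2 ∧ t.2 < nc := by
  rcases t with ⟨a, b⟩
  simp only [List.mem_flatMap, List.mem_map, PySem.List.mem_pyRange_one, Prod.mk.injEq]
  constructor
  · rintro ⟨i, hi, j, hj, rfl, rfl⟩
    exact ⟨hi.1, hi.2, hj.1, hj.2⟩
  · rintro ⟨h1, h2, h3, h4⟩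
    exact ⟨a, ⟨h1, h2⟩, b, ⟨h3, h4⟩, rfl, rfl⟩

theorem pvFilt3 (n r : Int) (h0 : 0 ≤ r) (h1 : r < n) :
    [r - 1, r, r + 1].filter (fun i => decide (0 ≤ i ∧ i < n))
      = PySem.List.pyRange (max (r - 1) 0) (min (r + 2) n) 1 := by
  by_cases h2 : 1 ≤ r <;> by_cases h3 : r + 2 ≤ n
  · rw [show max (r - 1) 0 = r - 1 by omega, show min (r + 2) n = r + 2 by omega, pvRange3]
    simp only [List.filter_cons, List.filter_nil, decide_eq_true_eq]
    split_ifs <;> first | rfl | (exfalso; omega)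
  · rw [show max (r - 1) 0 = r - 1 by omega, show min (r + 2) n = n by omega]
    rw [PySem.List.pyRange_one_cons (by omega), show r - 1 + 1 = r by omega,
        PySem.List.pyRange_one_cons (by omega), PySem.List.pyRange_one_eq_nil (by omega)]
    simp only [List.filter_cons, List.filter_nil, decide_eq_true_eq]
    split_ifs <;> first | rfl | (exfalso; omega)
  · rw [show max (r - 1) 0 = 0 by omega, show min (r + 2) n = r + 2 by omega]
    have hr0 : r = 0 := by omega
    subst hr0
    rw [PySem.List.pyRange_one_cons (by omega), PySem.List.pyRange_one_cons (by omega),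
        PySem.List.pyRange_one_eq_nil (by omega)]
    simp only [List.filter_cons, List.filter_nil, decide_eq_true_eq]
    split_ifs <;> first | rfl | (exfalso; omega)
  · have hr0 : r = 0 := by omega
    have hn1 : n = 1 := by omega
    subst hr0; subst hn1
    decide

theorem pvNear1 (n r : Int) (h0 : 0 ≤ r) (h1 : r < n) :
    (PySem.List.pyRange 0 n 1).filter (fun i => decide (|i - r| ≤ 1))
      = PySem.List.pyRange (max (r - 1) 0) (min (r + 2) n) 1 := by
  rw [PySem.List.pyRange_one_append 0 (max (r - 1) 0) n (by omega) (by omega),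
      PySem.List.pyRange_one_append (max (r - 1) 0) (min (r + 2) n) n (by omega) (by omega)]
  rw [List.filter_append, List.filter_append]
  have e1 : (PySem.List.pyRange 0 (max (r - 1) 0) 1).filter (fun i => decide (|i - r| ≤ 1)) = [] := by
    rw [List.filter_eq_nil_iff]
    intro x hx
    rw [PySem.List.mem_pyRange_one] at hx
    simp [abs_le]
    omega
  have e2 : (PySem.List.pyRange (max (r - 1) 0) (min (r + 2) n) 1).filter (fun i => decide (|i - r| ≤ 1))
      = PySem.List.pyRange (max (r - 1) 0) (min (r + 2) n) 1 := by
    rw [List.filter_eq_self]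
    intro x hx
    rw [PySem.List.mem_pyRange_one] at hx
    simp [abs_le]
    omega
  have e3 : (PySem.List.pyRange (min (r + 2) n) n 1).filter (fun i => decide (|i - r| ≤ 1)) = [] := by
    rw [List.filter_eq_nil_iff]
    intro x hx
    rw [PySem.List.mem_pyRange_one] at hx
    simp [abs_le]
    omega
  rw [e1, e2, e3, List.nil_append, List.append_nil]

theorem pvDec4 (nr nc : Int) (t : Int × Int) :
    decide (0 ≤ t.1 ∧ t.1 < nr ∧ 0 ≤ t.2 ∧ t.2 < nc)
      = (decide (0 ≤ t.1 ∧ t.1 < nr) && decide (0 ≤ t.2 ∧ t.2 < nc)) := by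
  rw [← Bool.decide_and]
  exact decide_eq_decide.mpr (by tauto)

theorem pvDec5 (r c : Int) (t : Int × Int) :
    decide (|t.1 - r| ≤ 1 ∧ |t.2 - c| ≤ 1)
      = (decide (|t.1 - r| ≤ 1) && decide (|t.2 - c| ≤ 1)) := by
  rw [← Bool.decide_and]

theorem pvDec1 (vb : List (List String)) (nr nc : Int) (t : Int × Int) :
    decide (0 ≤ t.1 ∧ t.1 < nr ∧ 0 ≤ t.2 ∧ t.2 < nc ∧ pvCell vb t.1 t.2 ≠ "-")
      = (decide (0 ≤ t.1 ∧ t.1 < nr ∧ 0 ≤ t.2 ∧ t.2 < nc) && !decide (pvCell vb t.1 t.2 = "-")) := by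
  rw [← decide_not, ← Bool.decide_and]
  exact decide_eq_decide.mpr (by tauto)

theorem pvDec2 (vb : List (List String)) (nr nc : Int) (t : Int × Int) :
    decide (0 ≤ t.1 ∧ t.1 < nr ∧ 0 ≤ t.2 ∧ t.2 < nc ∧ pvCell vb t.1 t.2 = "-")
      = (decide (0 ≤ t.1 ∧ t.1 < nr ∧ 0 ≤ t.2 ∧ t.2 < nc) && decide (pvCell vb t.1 t.2 = "-")) := by
  rw [← Bool.decide_and]
  exact decide_eq_decide.mpr (by tauto)

theorem pvBlockProd (nr nc r c : Int) :
    ([r - 1, r, r + 1].flatMap (fun i => [c - 1, c, c + 1].map (fun j => (i, j)))).filter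
        (fun t => decide (0 ≤ t.1 ∧ t.1 < nr ∧ 0 ≤ t.2 ∧ t.2 < nc))
      = ([r - 1, r, r + 1].filter (fun i => decide (0 ≤ i ∧ i < nr))).flatMap
          (fun i => ([c - 1, c, c + 1].filter (fun j => decide (0 ≤ j ∧ j < nc))).map (fun j => (i, j))) := by
  rw [show (fun t : Int × Int => decide (0 ≤ t.1 ∧ t.1 < nr ∧ 0 ≤ t.2 ∧ t.2 < nc))
        = (fun t : Int × Int => (fun i => decide (0 ≤ i ∧ i < nr)) t.1 && (fun j => decide (0 ≤ j ∧ j < nc)) t.2)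
      from funext (fun t => pvDec4 nr nc t)]
  exact pvFiltProd (fun i => decide (0 ≤ i ∧ i < nr)) (fun j => decide (0 ≤ j ∧ j < nc)) _ _

theorem pvGridProd (nr nc r c : Int) :
    ((PySem.List.pyRange 0 nr 1).flatMap (fun i => (PySem.List.pyRange 0 nc 1).map (fun j => (i, j)))).filter
        (fun t => decide (|t.1 - r| ≤ 1 ∧ |t.2 - c| ≤ 1))
      = ((PySem.List.pyRange 0 nr 1).filter (fun i => decide (|i - r| ≤ 1))).flatMap
          (fun i => ((PySem.List.pyRange 0 nc 1).filter (fun j => decide (|j - c| ≤ 1))).map (fun j => (i, j))) := by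
  rw [show (fun t : Int × Int => decide (|t.1 - r| ≤ 1 ∧ |t.2 - c| ≤ 1))
        = (fun t : Int × Int => (fun i => decide (|i - r| ≤ 1)) t.1 && (fun j => decide (|j - c| ≤ 1)) t.2)
      from funext (fun t => pvDec5 r c t)]
  exact pvFiltProd (fun i => decide (|i - r| ≤ 1)) (fun j => decide (|j - c| ≤ 1)) _ _

-- A's in-bounds-filtered 3x3 block equals the whole grid filtered by Chebyshev distance ≤ 1
theorem pvBlockInb (nr nc r c : Int) (hr : 0 ≤ r) (hr2 : r < nr) (hc : 0 ≤ c) (hc2 : c < nc) :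
    ([r - 1, r, r + 1].flatMap (fun i => [c - 1, c, c + 1].map (fun j => (i, j)))).filter
        (fun t => decide (0 ≤ t.1 ∧ t.1 < nr ∧ 0 ≤ t.2 ∧ t.2 < nc))
      = ((PySem.List.pyRange 0 nr 1).flatMap (fun i => (PySem.List.pyRange 0 nc 1).map (fun j => (i, j)))).filter
          (fun t => decide (|t.1 - r| ≤ 1 ∧ |t.2 - c| ≤ 1)) := by
  rw [pvBlockProd, pvGridProd, pvFilt3 nr r hr hr2, pvFilt3 nc c hc hc2,
      pvNear1 nr r hr hr2, pvNear1 nc c hc hc2]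

theorem pvInbLen (nr nc r c : Int) (hr : 0 ≤ r) (hr2 : r < nr) (hc : 0 ≤ c) (hc2 : c < nc) :
    ((([r - 1, r, r + 1].flatMap (fun i => [c - 1, c, c + 1].map (fun j => (i, j)))).filter
        (fun t => decide (0 ≤ t.1 ∧ t.1 < nr ∧ 0 ≤ t.2 ∧ t.2 < nc))).length : Int)
      = (min (r + 1) (nr - 1) - max (r - 1) 0 + 1) * (min (c + 1) (nc - 1) - max (c - 1) 0 + 1) := by
  rw [pvBlockProd, pvFilt3 nr r hr hr2, pvFilt3 nc c hc hc2, pvLenProd,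
      PySem.List.length_pyRange_one, PySem.List.length_pyRange_one]
  have ha : (((min (r + 2) nr - max (r - 1) 0).toNat : Nat) : Int) = min (r + 1) (nr - 1) - max (r - 1) 0 + 1 := by omega
  have hb : (((min (c + 2) nc - max (c - 1) 0).toNat : Nat) : Int) = min (c + 1) (nc - 1) - max (c - 1) 0 + 1 := by omega
  rw [Nat.cast_mul, ha, hb]

theorem pvSafeShape (P : Int × Int → Prop) [DecidablePred P] (L : List (Int × Int)) (acc : List (Int × Int)) :
    L.foldl (fun sc t => if P t then sc ++ [(t.1, t.2)] else sc) acc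
      = acc ++ L.filter (fun t => decide (P t)) := by
  induction L generalizing acc with
  | nil => simp
  | cons x L ih => by_cases h : P x <;> simp [h, ih]

theorem pvCntB (p q : Int × Int → Bool) (L : List (Int × Int)) :
    ((L.countP (fun t => p t && !q t) : Nat) : Int)
      = (((L.filter p).length : Nat) : Int) - ((((L.filter p).filter q).length : Nat) : Int) := by
  induction L with
  | nil => simp
  | cons x L ih =>
    cases hp : p x <;> cases hq : q x <;>
      simp [hp, hq, -List.filter_filter] <;> omega

-- pass 1 of B: the sweep returns the digit-cell triples and the hidden cells, each a filter of the list
theorem pvPass1 (vb : List (List String)) (L : List (Int × Int)) (a : List (Int × Int × Int)) (b : List (Int × Int)) :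
    L.foldl (fun st t =>
        if PySem.Str.strIsdigit (pvCell vb t.1 t.2) then
          (st.1 ++ [(t.1, t.2, (PySem.Int.ofStr? (pvCell vb t.1 t.2)).getD 0)], st.2)
        else if pvCell vb t.1 t.2 = "-" then (st.1, st.2 ++ [(t.1, t.2)]) else st) (a, b)
      = (a ++ (L.filter (fun t => PySem.Str.strIsdigit (pvCell vb t.1 t.2))).map
              (fun t => (t.1, t.2, (PySem.Int.ofStr? (pvCell vb t.1 t.2)).getD 0)),
         b ++ L.filter (fun t => decide (pvCell vb t.1 t.2 = "-"))) := by
  induction L generalizing a b with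
  | nil => simp
  | cons x L ih =>
    rw [List.foldl_cons]
    by_cases hd : PySem.Str.strIsdigit (pvCell vb x.1 x.2) = true
    · have hne : ¬(pvCell vb x.1 x.2 = "-") := by
        intro h; rw [h] at hd; exact absurd hd (by decide)
      have hd' : PySem.Chars.strIsdigit (pvCell vb x.1 x.2).toList = true := by simpa using hd
      rw [if_pos hd, ih]
      simp [hd', hne]
    · have hd' : ¬(PySem.Chars.strIsdigit (pvCell vb x.1 x.2).toList = true) := by simpa using hd
      rw [if_neg hd]
      by_cases hh : pvCell vb x.1 x.2 = "-"
      · rw [if_pos hh, ih]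
        simp [hh, show PySem.Chars.strIsdigit ['-'] = false from by decide]
      · rw [if_neg hh, ih]
        simp [hd', hh]

-- per digit cell: A's branch body equals B's branch body
theorem pvCellEq (vb : List (List String)) (nr nc r c : Int)
    (hr : 0 ≤ r) (hr2 : r < nr) (hc : 0 ≤ c) (hc2 : c < nc)
    (st : List (Int × Int) × List (Int × Int)) :
    (if (PySem.Int.ofStr? (pvCell vb r c)).getD 0 -
        (PySem.List.pyRange (r - 1) (r + 2) 1).foldl (fun acc i =>
          (PySem.List.pyRange (c - 1) (c + 2) 1).foldl (fun acc j =>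
            if 0 ≤ i ∧ i < nr ∧ 0 ≤ j ∧ j < nc ∧ pvCell vb i j ≠ "-" then acc + 1 else acc) acc) 0 = 1 then
       ((PySem.List.pyRange (r - 1) (r + 2) 1).foldl (fun sc i =>
          (PySem.List.pyRange (c - 1) (c + 2) 1).foldl (fun sc j =>
            if 0 ≤ i ∧ i < nr ∧ 0 ≤ j ∧ j < nc ∧ pvCell vb i j = "-" then sc ++ [(i, j)] else sc) sc) st.1, st.2)
     else if (PySem.Int.ofStr? (pvCell vb r c)).getD 0 -
        (PySem.List.pyRange (r - 1) (r + 2) 1).foldl (fun acc i =>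
          (PySem.List.pyRange (c - 1) (c + 2) 1).foldl (fun acc j =>
            if 0 ≤ i ∧ i < nr ∧ 0 ≤ j ∧ j < nc ∧ pvCell vb i j ≠ "-" then acc + 1 else acc) acc) 0 = 0 then
       (st.1, st.2 ++ [(r, c)])
     else st)
    = (if (PySem.Int.ofStr? (pvCell vb r c)).getD 0 -
          ((min (r + 1) (nr - 1) - max (r - 1) 0 + 1) * (min (c + 1) (nc - 1) - max (c - 1) 0 + 1)
            - (((((PySem.List.pyRange 0 nr 1).flatMap (fun i => (PySem.List.pyRange 0 nc 1).map (fun j => (i, j)))).filter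
                  (fun t => decide (pvCell vb t.1 t.2 = "-"))).filter
                    (fun h => decide (|h.1 - r| ≤ 1 ∧ |h.2 - c| ≤ 1))).length : Int)) = 1 then
         (st.1 ++ (((PySem.List.pyRange 0 nr 1).flatMap (fun i => (PySem.List.pyRange 0 nc 1).map (fun j => (i, j)))).filter
                  (fun t => decide (pvCell vb t.1 t.2 = "-"))).filter
                    (fun h => decide (|h.1 - r| ≤ 1 ∧ |h.2 - c| ≤ 1)), st.2)
       else if (PySem.Int.ofStr? (pvCell vb r c)).getD 0 -
          ((min (r + 1) (nr - 1) - max (r - 1) 0 + 1) * (min (c + 1) (nc - 1) - max (c - 1) 0 + 1)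
            - (((((PySem.List.pyRange 0 nr 1).flatMap (fun i => (PySem.List.pyRange 0 nc 1).map (fun j => (i, j)))).filter
                  (fun t => decide (pvCell vb t.1 t.2 = "-"))).filter
                    (fun h => decide (|h.1 - r| ≤ 1 ∧ |h.2 - c| ≤ 1))).length : Int)) = 0 then
         (st.1, st.2 ++ [(r, c)])
       else st) := by
  have hH : (([r - 1, r, r + 1].flatMap (fun i => [c - 1, c, c + 1].map (fun j => (i, j)))).filter
        (fun t => decide (0 ≤ t.1 ∧ t.1 < nr ∧ 0 ≤ t.2 ∧ t.2 < nc))).filter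
          (fun t => decide (pvCell vb t.1 t.2 = "-"))
      = (((PySem.List.pyRange 0 nr 1).flatMap (fun i => (PySem.List.pyRange 0 nc 1).map (fun j => (i, j)))).filter
            (fun t => decide (pvCell vb t.1 t.2 = "-"))).filter
          (fun h => decide (|h.1 - r| ≤ 1 ∧ |h.2 - c| ≤ 1)) := by
    rw [pvBlockInb nr nc r c hr hr2 hc hc2, List.filter_comm]
  have hsafe : (PySem.List.pyRange (r - 1) (r + 2) 1).foldl (fun sc i =>
          (PySem.List.pyRange (c - 1) (c + 2) 1).foldl (fun sc j =>
            if 0 ≤ i ∧ i < nr ∧ 0 ≤ j ∧ j < nc ∧ pvCell vb i j = "-" then sc ++ [(i, j)] else sc) sc) st.1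
      = st.1 ++ (((PySem.List.pyRange 0 nr 1).flatMap (fun i => (PySem.List.pyRange 0 nc 1).map (fun j => (i, j)))).filter
            (fun t => decide (pvCell vb t.1 t.2 = "-"))).filter
          (fun h => decide (|h.1 - r| ≤ 1 ∧ |h.2 - c| ≤ 1)) := by
    rw [pvRange3 r, pvRange3 c, pvFoldFlat]
    rw [pvSafeShape (fun t : Int × Int => 0 ≤ t.1 ∧ t.1 < nr ∧ 0 ≤ t.2 ∧ t.2 < nc ∧ pvCell vb t.1 t.2 = "-")]
    rw [List.filter_congr (fun t _ => pvDec2 vb nr nc t)]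
    rw [← List.filter_filter, List.filter_comm, hH]
  have hcnt : (PySem.List.pyRange (r - 1) (r + 2) 1).foldl (fun acc i =>
          (PySem.List.pyRange (c - 1) (c + 2) 1).foldl (fun acc j =>
            if 0 ≤ i ∧ i < nr ∧ 0 ≤ j ∧ j < nc ∧ pvCell vb i j ≠ "-" then acc + 1 else acc) acc) 0
      = (min (r + 1) (nr - 1) - max (r - 1) 0 + 1) * (min (c + 1) (nc - 1) - max (c - 1) 0 + 1)
        - (((((PySem.List.pyRange 0 nr 1).flatMap (fun i => (PySem.List.pyRange 0 nc 1).map (fun j => (i, j)))).filter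
              (fun t => decide (pvCell vb t.1 t.2 = "-"))).filter
                (fun h => decide (|h.1 - r| ≤ 1 ∧ |h.2 - c| ≤ 1))).length : Int) := by
    rw [pvRange3 r, pvRange3 c, pvFoldFlat]
    rw [PySem.List.foldl_ite_add_one (p := fun t : Int × Int => 0 ≤ t.1 ∧ t.1 < nr ∧ 0 ≤ t.2 ∧ t.2 < nc ∧ pvCell vb t.1 t.2 ≠ "-")]
    rw [List.countP_congr (fun t _ => by rw [pvDec1 vb nr nc t])]
    rw [pvCntB (fun t => decide (0 ≤ t.1 ∧ t.1 < nr ∧ 0 ≤ t.2 ∧ t.2 < nc)) (fun t => decide (pvCell vb t.1 t.2 = "-"))]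
    rw [pvInbLen nr nc r c hr hr2 hc hc2, hH]
    omega
  rw [hcnt, hsafe]

-- ===== VERDICT (by name: the statement is the Claim_ definition above) =====
theorem analyze_revealed_cells_spec : Claim_equal_analyze_revealed_cells := by
  intro vb _ _
  unfold Spec_analyze_revealed_cells
  cases vb with
  | nil => rfl
  | cons r0 rest =>
    unfold analyze_revealed_cells analyze_revealed_cells_alt
    simp only [PySem.List.pyGetD_zero_cons]
    rw [pvFoldFlat]
    rw [pvFoldFlat]
    rw [pvPass1]
    simp only [List.nil_append]
    rw [List.foldl_map]
    rw [PySem.List.foldl_ite_eq_foldl_filter]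
    rw [show (fun t : Int × Int => decide (PySem.Str.strIsdigit (pvCell (r0 :: rest) t.1 t.2) = true))
          = (fun t : Int × Int => PySem.Str.strIsdigit (pvCell (r0 :: rest) t.1 t.2))
        from funext (fun t => by simp)]
    apply PySem.List.foldl_congr_mem
    intro st t ht
    have hb := (pvMemGrid ((r0 :: rest).length : Int) (r0.length : Int) t).mp (List.mem_of_mem_filter ht)
    exact pvCellEq (r0 :: rest) _ _ t.1 t.2 hb.1 hb.2.1 hb.2.2.1 hb.2.2.2 st
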